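-- pv_equiv track=rewrite | github.com/YaqiangCao/ryder | patrol.py | buildCov
-- ===== SOURCE A (Python) =====
-- def buildCov(rs):
--     """
--     Genomic region coverage
--     """
--     lims = {}
--     cov = {}
--     for r in rs:
--         #coverages
--         if r[0] not in cov:
--             cov[r[0]] = set()
--         cov[r[0]].update(range(r[1], r[2] + 1))
--         #range limitations
--         if r[0] not in lims:
--             lims[r[0]] = [r[1], r[2]]
--         if r[1] < lims[r[0]][0]:
--             lims[r[0]][0] = r[1]
--         if r[2] > lims[r[0]][1]:
--             lims[r[0]][1] = r[2]
--     return cov, lims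
-- ===== SOURCE B (Python) =====
-- def buildCov(rs):
--     """
--     Genomic region coverage
--     """
--     # group regions by chromosome first (first-seen key order), then process each group
--     index = {}
--     for r in rs:
--         index.setdefault(r[0], []).append((r[1], r[2]))
--     cov = {}
--     lims = {}
--     for chrom, regions in index.items():
--         s = set()
--         for a, b in regions:
--             s.update(range(a, b + 1))
--         cov[chrom] = s
--         lims[chrom] = [min(a for a, _ in regions), max(b for _, b in regions)]
--     return cov, lims
-- ===== Notes on version B (the rewrite author's own statement) =====
-- stated objective: alternative
-- what changed: A's single interleaved streaming pass with per-region dict conditionals is replaced by a group-then-process decomposition: one pass indexes regions by chromosome, a second pass builds each covered set by unioning its ranges and computes the limits directly as min/max of the grouped endpoints.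
import Mathlib
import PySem

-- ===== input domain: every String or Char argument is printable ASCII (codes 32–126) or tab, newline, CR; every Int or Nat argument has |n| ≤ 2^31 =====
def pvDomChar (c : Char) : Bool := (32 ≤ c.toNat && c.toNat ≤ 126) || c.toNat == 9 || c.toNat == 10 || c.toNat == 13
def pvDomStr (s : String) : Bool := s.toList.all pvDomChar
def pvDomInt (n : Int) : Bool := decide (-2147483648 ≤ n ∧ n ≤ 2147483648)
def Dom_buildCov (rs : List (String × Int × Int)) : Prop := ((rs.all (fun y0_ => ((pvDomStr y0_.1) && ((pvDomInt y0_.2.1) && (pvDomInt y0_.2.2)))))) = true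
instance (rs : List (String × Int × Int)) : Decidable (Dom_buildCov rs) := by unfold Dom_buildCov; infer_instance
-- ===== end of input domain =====

-- B replaces A's interleaved streaming pass by a group-by-chromosome pass followed by
-- per-group processing (same asymptotic cost; alternative decomposition).


-- ===== PORT A =====
-- one loop iteration of A: conditional set-creation, set update, conditional lims
-- creation, then the two in-place min/max updates on the 2-element lims list
def buildCovStep (st : PySem.Dict String (PySem.Set Int) × PySem.Dict String (List Int))
    (r : String × Int × Int) :
    PySem.Dict String (PySem.Set Int) × PySem.Dict String (List Int) :=
  let cov := st.1
  let lims := st.2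
  let cov := if cov.contains r.1 then cov else cov.insert r.1 PySem.Set.empty
  -- cov[r[0]].update(range(r[1], r[2] + 1)) : mutate the stored set in place
  let cov := cov.insert r.1
      (PySem.Set.update (cov.getD r.1 PySem.Set.empty) (PySem.List.pyRange r.2.1 (r.2.2 + 1) 1))
  let lims := if lims.contains r.1 then lims else lims.insert r.1 [r.2.1, r.2.2]
  let v := lims.getD r.1 []
  let v := if r.2.1 < PySem.List.pyGetD v 0 0 then PySem.List.pySetD v 0 r.2.1 else v
  let v := if r.2.2 > PySem.List.pyGetD v 1 0 then PySem.List.pySetD v 1 r.2.2 else v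
  let lims := lims.insert r.1 v
  (cov, lims)

def buildCov (rs : List (String × Int × Int)) :
    (List (String × List Int)) × (List (String × List Int)) :=
  let st := rs.foldl buildCovStep (PySem.Dict.empty, PySem.Dict.empty)
  (st.1.items, st.2.items)

-- ===== PORT B =====
-- index.setdefault(r[0], []).append((r[1], r[2]))
def buildIndex (rs : List (String × Int × Int)) : PySem.Dict String (List (Int × Int)) :=
  rs.foldl (fun d r => d.modify r.1 [] (· ++ [r.2])) PySem.Dict.empty

-- s = set(); for a, b in regions: s.update(range(a, b + 1))
def covOf (regs : List (Int × Int)) : PySem.Set Int :=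
  regs.foldl (fun s ab => PySem.Set.update s (PySem.List.pyRange ab.1 (ab.2 + 1) 1))
    PySem.Set.empty

-- [min(a for a, _ in regions), max(b for _, b in regions)]  (regions is never empty)
def limsOf (regs : List (Int × Int)) : List Int :=
  [(PySem.List.min? (regs.map (·.1)) (fun x => x)).getD 0,
   (PySem.List.max? (regs.map (·.2)) (fun x => x)).getD 0]

def buildCov_alt (rs : List (String × Int × Int)) :
    (List (String × List Int)) × (List (String × List Int)) :=
  let ix := buildIndex rs
  let st := ix.items.foldl
    (fun (cl : PySem.Dict String (PySem.Set Int) × PySem.Dict String (List Int)) p =>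
      (cl.1.insert p.1 (covOf p.2), cl.2.insert p.1 (limsOf p.2)))
    (PySem.Dict.empty, PySem.Dict.empty)
  (st.1.items, st.2.items)

-- ===== PRECONDITION & SPEC =====
def Spec_buildCov (rs : List (String × Int × Int)) (out : (List (String × List Int)) × (List (String × List Int))) : Prop := out = buildCov_alt rs
instance (rs : List (String × Int × Int)) (out : (List (String × List Int)) × (List (String × List Int))) : Decidable (Spec_buildCov rs out) := by unfold Spec_buildCov; infer_instance

-- ===== CLAIM (what is proved, stated in full; the proofs are below) =====
def Claim_equal_buildCov : Prop := ∀ (rs : List (String × Int × Int)), Dom_buildCov rs → Spec_buildCov rs (buildCov rs)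

-- ===== LEMMAS AND PROOFS =====

-- association-list entries of the two result dicts, indexed by a group of IndexEntries
def covE (p : String × List (Int × Int)) : String × PySem.Set Int := (p.1, covOf p.2)
def limE (p : String × List (Int × Int)) : String × List Int := (p.1, limsOf p.2)

lemma buildIndex_append (rs : List (String × Int × Int)) (r : String × Int × Int) :
    buildIndex (rs ++ [r]) =
      (buildIndex rs).insert r.1 ((buildIndex rs).getD r.1 [] ++ [r.2]) := by
  simp [buildIndex, List.foldl_append]
  rfl

lemma nodup_keys_buildIndex (rs : List (String × Int × Int)) :
    (buildIndex rs).keys.Nodup := by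
  have := PySem.Dict.nodup_keys_foldl_modify_key rs (fun r => r.1) ([] : List (Int × Int))
    (fun _ r v => v ++ [r.2]) PySem.Dict.empty (by simp)
  exact this

lemma buildIndex_values_ne_nil (rs : List (String × Int × Int)) :
    ∀ p ∈ (buildIndex rs).items, p.2 ≠ [] := by
  induction rs using List.reverseRecOn with
  | nil => intro p hp; simp [buildIndex, PySem.Dict.empty] at hp
  | append_singleton rs r ih =>
    intro p hp
    rw [buildIndex_append] at hp
    by_cases hc : (buildIndex rs).contains r.1
    · rw [PySem.Dict.items_insert_of_contains _ _ hc] at hp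
      obtain ⟨q, hq, hqe⟩ := List.mem_map.mp hp
      by_cases h : q.1 = r.1
      · simp [h] at hqe; subst hqe; simp
      · simp [h] at hqe; subst hqe; exact ih q hq
    · rw [PySem.Dict.items_insert_of_not_contains _ _ (by simpa using hc)] at hp
      rcases List.mem_append.mp hp with h | h
      · exact ih p h
      · simp at h; subst h; simp

-- two entries of a nodup-keyed assoc list with the same key are equal
lemma assoc_key_unique {ν : Type} (l : List (String × ν)) (h : (l.map Prod.fst).Nodup)
    {k : String} {v w : ν} (h1 : (k, v) ∈ l) (h2 : (k, w) ∈ l) : v = w := by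
  induction l with
  | nil => simp at h1
  | cons q t ih =>
    simp only [List.map_cons, List.nodup_cons] at h
    rcases List.mem_cons.mp h1 with e1 | m1 <;> rcases List.mem_cons.mp h2 with e2 | m2
    · rw [← e1] at e2; exact ((Prod.mk.injEq _ _ _ _).mp e2.symm).2
    · exfalso; apply h.1; rw [← e1]; exact List.mem_map.mpr ⟨_, m2, rfl⟩
    · exfalso; apply h.1; rw [← e2]; exact List.mem_map.mpr ⟨_, m1, rfl⟩
    · exact ih h.2 m1 m2

lemma covOf_append (regs : List (Int × Int)) (ab : Int × Int) :
    covOf (regs ++ [ab]) =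
      PySem.Set.update (covOf regs) (PySem.List.pyRange ab.1 (ab.2 + 1) 1) := by
  simp [covOf, List.foldl_append]

-- A's two in-place conditional updates on [m, M] compute limsOf of the extended group
lemma lims_update_eq (regs : List (Int × Int)) (hne : regs ≠ []) (a b : Int) :
    (let v := limsOf regs
     let v := if a < PySem.List.pyGetD v 0 0 then PySem.List.pySetD v 0 a else v
     let v := if b > PySem.List.pyGetD v 1 0 then PySem.List.pySetD v 1 b else v
     v) = limsOf (regs ++ [(a, b)]) := by
  obtain ⟨q, t, rfl⟩ := List.exists_cons_of_ne_nil hne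
  simp only [limsOf, List.map_cons, List.map_append, PySem.List.min?_id_cons,
    PySem.List.max?_id_cons, Option.getD_some, List.cons_append, List.foldl_append]
  set m := List.foldl min q.1 (t.map (·.1)) with hm
  set M := List.foldl max q.2 (t.map (·.2)) with hM
  simp only [List.foldl_cons]
  by_cases h1 : a < m <;> by_cases h2 : b > M <;>
    simp [h1, h2, PySem.List.pyGetD, PySem.List.pyGet?, PySem.List.pySetD, PySem.List.pySet?,
      PySem.List.pyIdx?, min_def, max_def] <;> omega

-- main invariant: A's fold state is exactly B's two dicts over the grouped index
lemma buildCov_state (rs : List (String × Int × Int)) :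
    rs.foldl buildCovStep (PySem.Dict.empty, PySem.Dict.empty) =
      (PySem.Dict.mk ((buildIndex rs).items.map covE),
       PySem.Dict.mk ((buildIndex rs).items.map limE)) := by
  induction rs using List.reverseRecOn with
  | nil => rfl
  | append_singleton rs r ih =>
    rw [List.foldl_append, List.foldl_cons, List.foldl_nil, ih, buildIndex_append]
    have hnd : ((buildIndex rs).items.map Prod.fst).Nodup := nodup_keys_buildIndex rs
    have hfc : ((buildIndex rs).items.map covE).map Prod.fst
        = (buildIndex rs).items.map Prod.fst := by
      simp only [List.map_map]; rfl
    have hfl : ((buildIndex rs).items.map limE).map Prod.fst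
        = (buildIndex rs).items.map Prod.fst := by
      simp only [List.map_map]; rfl
    have hkc : (PySem.Dict.mk ((buildIndex rs).items.map covE)).contains r.1
        = (buildIndex rs).contains r.1 := by
      rw [PySem.Dict.contains_eq_decide_mem_keys, PySem.Dict.contains_eq_decide_mem_keys]
      show decide (r.1 ∈ ((buildIndex rs).items.map covE).map Prod.fst) = _
      rw [hfc]; rfl
    have hkl : (PySem.Dict.mk ((buildIndex rs).items.map limE)).contains r.1
        = (buildIndex rs).contains r.1 := by
      rw [PySem.Dict.contains_eq_decide_mem_keys, PySem.Dict.contains_eq_decide_mem_keys]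
      show decide (r.1 ∈ ((buildIndex rs).items.map limE).map Prod.fst) = _
      rw [hfl]; rfl
    by_cases hc : (buildIndex rs).contains r.1 = true
    · -- existing chromosome: in-place replacement on both sides
      obtain ⟨p, hp, hp1⟩ : ∃ p ∈ (buildIndex rs).items, p.1 = r.1 := by
        have : r.1 ∈ (buildIndex rs).items.map Prod.fst := by
          have := (PySem.Dict.contains_eq_decide_mem_keys (buildIndex rs) r.1) ▸ hc
          simpa [PySem.Dict.keys] using of_decide_eq_true this
        simpa using this
      set regs := p.2 with hregs
      have hpmem : (r.1, regs) ∈ (buildIndex rs).items := by rw [← hp1]; exact hp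
      have hregs_ne : regs ≠ [] := buildIndex_values_ne_nil rs p hp
      have hgix : (buildIndex rs).getD r.1 [] = regs :=
        PySem.Dict.getD_of_mem_items _ hpmem hnd _
      have hgcov : (PySem.Dict.mk ((buildIndex rs).items.map covE)).getD r.1 PySem.Set.empty
          = covOf regs := by
        refine PySem.Dict.getD_of_mem_items _ ?_ ?_ _
        · exact List.mem_map.mpr ⟨(r.1, regs), hpmem, rfl⟩
        · show (((buildIndex rs).items.map covE).map Prod.fst).Nodup
          rw [hfc]; exact hnd
      have hglim : (PySem.Dict.mk ((buildIndex rs).items.map limE)).getD r.1 []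
          = limsOf regs := by
        refine PySem.Dict.getD_of_mem_items _ ?_ ?_ _
        · exact List.mem_map.mpr ⟨(r.1, regs), hpmem, rfl⟩
        · show (((buildIndex rs).items.map limE).map Prod.fst).Nodup
          rw [hfl]; exact hnd
      simp only [buildCovStep, hkc, hkl, hc, if_true, hgcov, hglim, hgix]
      have hvl := lims_update_eq regs hregs_ne r.2.1 r.2.2
      simp only at hvl
      rw [hvl]
      refine Prod.ext ?_ ?_ <;> apply PySem.Dict.ext <;>
        rw [PySem.Dict.items_insert_of_contains _ _ (by simp only [hkc, hkl]; exact hc),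
            PySem.Dict.items_insert_of_contains _ _ hc] <;>
        show List.map _ (List.map _ _) = List.map _ (List.map _ _) <;>
        rw [List.map_map, List.map_map] <;>
        refine List.map_congr_left fun q hq => ?_
      · by_cases hq1 : q.1 = r.1
        · have : q.2 = regs := assoc_key_unique _ hnd (hq1 ▸ hq) hpmem
          simp [covE, Function.comp, hq1, this, covOf_append]
        · simp [covE, Function.comp, hq1]
      · by_cases hq1 : q.1 = r.1
        · have : q.2 = regs := assoc_key_unique _ hnd (hq1 ▸ hq) hpmem
          simp only [Function.comp_apply, hq1, this, beq_self_eq_true, if_true, limE]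
        · simp [limE, Function.comp, hq1]
    · -- new chromosome: both sides append the fresh entry
      have hc' : (buildIndex rs).contains r.1 = false := by simpa using hc
      have hnotin : r.1 ∉ (buildIndex rs).items.map Prod.fst := by
        have h := hc'
        rw [PySem.Dict.contains_eq_decide_mem_keys] at h
        simpa [PySem.Dict.keys] using of_decide_eq_false h
      have hgix : (buildIndex rs).getD r.1 [] = [] :=
        PySem.Dict.getD_of_not_contains _ _ hc' 
      have hkcf : (PySem.Dict.mk ((buildIndex rs).items.map covE)).contains r.1 = false := by
        rw [hkc]; exact hc'
      have hklf : (PySem.Dict.mk ((buildIndex rs).items.map limE)).contains r.1 = false := by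
        rw [hkl]; exact hc'
      simp only [buildCovStep, hkcf, hklf, Bool.false_eq_true, if_false, hgix,
        PySem.Dict.getD_insert_self]
      have hg0 : PySem.List.pyGetD [r.2.1, r.2.2] (0 : Int) 0 = r.2.1 := by
        simp [PySem.List.pyGetD, PySem.List.pyGet?, PySem.List.pyIdx?]
      have hg1 : PySem.List.pyGetD [r.2.1, r.2.2] (1 : Int) 0 = r.2.2 := by
        simp [PySem.List.pyGetD, PySem.List.pyGet?, PySem.List.pyIdx?]
      rw [hg0, if_neg (lt_irrefl r.2.1), hg1, if_neg (lt_irrefl r.2.2)]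
      refine Prod.ext ?_ ?_ <;> apply PySem.Dict.ext
      · rw [PySem.Dict.items_insert_of_contains _ _
              (by rw [PySem.Dict.contains_insert_self]),
            PySem.Dict.items_insert_of_not_contains _ _ hkcf,
            PySem.Dict.items_insert_of_not_contains _ _ hc']
        show List.map _ (List.map covE _ ++ [(r.1, PySem.Set.empty)])
            = List.map covE (_ ++ [(r.1, [] ++ [r.2])])
        rw [List.map_append, List.map_append, List.map_map]
        refine congrArg₂ (· ++ ·) ?_ ?_
        · refine List.map_congr_left fun q hq => ?_
          have hq1 : q.1 ≠ r.1 := fun h => hnotin (h ▸ List.mem_map.mpr ⟨q, hq, rfl⟩)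
          simp [covE, Function.comp, hq1]
        · simp [covE, covOf]
      · rw [PySem.Dict.items_insert_of_contains _ _
              (by rw [PySem.Dict.contains_insert_self]),
            PySem.Dict.items_insert_of_not_contains _ _ hklf,
            PySem.Dict.items_insert_of_not_contains _ _ hc']
        show List.map _ (List.map limE _ ++ [(r.1, [r.2.1, r.2.2])])
            = List.map limE (_ ++ [(r.1, [] ++ [r.2])])
        rw [List.map_append, List.map_append, List.map_map]
        refine congrArg₂ (· ++ ·) ?_ ?_
        · refine List.map_congr_left fun q hq => ?_
          have hq1 : q.1 ≠ r.1 := fun h => hnotin (h ▸ List.mem_map.mpr ⟨q, hq, rfl⟩)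
          simp [limE, Function.comp, hq1]
        · simp [limE, limsOf, PySem.List.min?_id_cons, PySem.List.max?_id_cons]

lemma alt_fold_split (rs : List (String × Int × Int)) :
    buildCov_alt rs =
      ((buildIndex rs).items.map covE, (buildIndex rs).items.map limE) := by
  have h0 : buildCov_alt rs =
      ((((buildIndex rs).items.foldl
          (fun (cl : PySem.Dict String (PySem.Set Int) × PySem.Dict String (List Int)) p =>
            (cl.1.insert p.1 (covOf p.2), cl.2.insert p.1 (limsOf p.2)))
          (PySem.Dict.empty, PySem.Dict.empty))).1.items,
       (((buildIndex rs).items.foldl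
          (fun (cl : PySem.Dict String (PySem.Set Int) × PySem.Dict String (List Int)) p =>
            (cl.1.insert p.1 (covOf p.2), cl.2.insert p.1 (limsOf p.2)))
          (PySem.Dict.empty, PySem.Dict.empty))).2.items) := rfl
  rw [h0, PySem.List.foldl_prod_mk
    (fun (d : PySem.Dict String (PySem.Set Int)) (p : String × List (Int × Int)) =>
      d.insert p.1 (covOf p.2))
    (fun (d : PySem.Dict String (List Int)) (p : String × List (Int × Int)) =>
      d.insert p.1 (limsOf p.2))
    (buildIndex rs).items PySem.Dict.empty PySem.Dict.empty]
  have hnd : ((buildIndex rs).items.map Prod.fst).Nodup := nodup_keys_buildIndex rs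
  have h1 := PySem.Dict.items_foldl_insert_fresh (buildIndex rs).items Prod.fst
    (fun p => covOf p.2) PySem.Dict.empty (by intro a _; rfl) hnd
  have h2 := PySem.Dict.items_foldl_insert_fresh (buildIndex rs).items Prod.fst
    (fun p => limsOf p.2) PySem.Dict.empty (by intro a _; rfl) hnd
  simp only at h1 h2 ⊢
  rw [h1, h2]
  rfl

-- ===== VERDICT (by name: the statement is the Claim_ definition above) =====
theorem buildCov_spec : Claim_equal_buildCov := by
  intro rs _
  unfold Spec_buildCov
  rw [alt_fold_split]
  unfold buildCov
  rw [buildCov_state]
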